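-- pv_equiv track=rewrite | github.com/besasam/advent-of-code | 2020/18/18.py | split_expression
-- ===== SOURCE A (Python) =====
-- def split_expression(expression):
--     expression = list(expression.replace(' ', ''))
--     res = []
--     sub = ''
--     parentheses = 0
--     for c in expression:
--         if parentheses > 0:
--             if c == ')':
--                 if parentheses == 1:
--                     res.append(sub)
--                     sub = ''
--                     parentheses = 0
--                     continue
--                 else:
--                     parentheses -= 1
--             elif c == '(':
--                 parentheses += 1
--             sub += c
--         elif c == '(':
--             parentheses += 1
--         else:
--             res.append(c)
--     return res
-- ===== SOURCE B (Python) =====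
-- def split_expression(expression):
--     s = expression.replace(' ', '')
--     res = []
--     i = 0
--     n = len(s)
--     while i < n:
--         c = s[i]
--         if c == '(':
--             depth = 1
--             j = i + 1
--             while j < n and depth > 0:
--                 if s[j] == '(':
--                     depth += 1
--                 elif s[j] == ')':
--                     depth -= 1
--                 j += 1
--             if depth == 0:
--                 res.append(s[i + 1:j - 1])
--                 i = j
--             else:
--                 break
--         else:
--             res.append(c)
--             i += 1
--     return res
-- ===== Notes on version B (the rewrite author's own statement) =====
-- stated objective: simpler
-- what changed: Replaces A's single char-by-char pass with a mutable (res, sub, depth) accumulator state by an index walk that, at each top-level opening parenthesis, runs a bracket-matching forward scan and emits the inner slice as one token.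
import Mathlib
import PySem

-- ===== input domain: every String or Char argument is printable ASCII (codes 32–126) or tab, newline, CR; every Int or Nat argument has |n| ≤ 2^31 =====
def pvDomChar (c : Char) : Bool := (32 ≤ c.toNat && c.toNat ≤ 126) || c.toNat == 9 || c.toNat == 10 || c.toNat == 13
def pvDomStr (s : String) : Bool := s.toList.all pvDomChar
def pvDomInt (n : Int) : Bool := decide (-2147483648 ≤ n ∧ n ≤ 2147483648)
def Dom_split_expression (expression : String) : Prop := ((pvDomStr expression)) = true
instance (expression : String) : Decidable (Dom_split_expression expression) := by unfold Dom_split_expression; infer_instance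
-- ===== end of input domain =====

-- B replaces A's char-by-char accumulator-with-depth-flag by an index walk that, at each opening parenthesis,
-- runs a bracket-matching sub-scan and emits the inner slice as one token (objective: simpler decomposition).

-- ===== PORT A =====
-- A's for-loop over the space-stripped characters, state (res, sub, parentheses).
def pvStepA (st : List String × List Char × Int) (c : Char) : List String × List Char × Int :=
  let res := st.1; let sub := st.2.1; let p := st.2.2
  if p > 0 then
    if c = ')' then
      if p = 1 then (res ++ [String.mk sub], [], 0)
      else (res, sub ++ [c], p - 1)
    else if c = '(' then (res, sub ++ [c], p + 1)
    else (res, sub ++ [c], p)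
  else if c = '(' then (res, sub, p + 1)
  else (res ++ [String.mk [c]], sub, p)

def split_expression (expression : String) : List String :=
  let expr := (PySem.Str.replace expression " " "").toList
  (expr.foldl pvStepA ([], [], 0)).1

-- ===== PORT B =====
-- B's inner while loop: walk the suffix after the '(' counting depth (scanned chars, remaining
-- suffix, final depth); the suffix plays the role of the index j into the string.
def pvScanB (acc : List Char) (d : Int) : List Char → List Char × List Char × Int
  | [] => (acc, [], d)
  | c :: t =>
    if d > 0 then
      pvScanB (acc ++ [c]) (if c = '(' then d + 1 else if c = ')' then d - 1 else d) t
    else (acc, c :: t, d)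

theorem pvScanB_len (acc : List Char) (d : Int) (l : List Char) :
    (pvScanB acc d l).2.1.length ≤ l.length := by
  induction l generalizing acc d with
  | nil => simp [pvScanB]
  | cons c t ih =>
    simp only [pvScanB]
    split
    · exact le_trans (ih _ _) (by simp)
    · simp

-- B's outer while loop over the suffix s[i:].
def pvLoopB (res : List String) : List Char → List String
  | [] => res
  | c :: t =>
    if c = '(' then
      let r := pvScanB [] 1 t
      if r.2.2 = 0 then pvLoopB (res ++ [String.mk r.1.dropLast]) r.2.1
      else res
    else pvLoopB (res ++ [String.mk [c]]) t
  termination_by l => l.length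
  decreasing_by
  · exact Nat.lt_succ_of_le (pvScanB_len [] 1 t)
  · simp

def split_expression_alt (expression : String) : List String :=
  let s := (PySem.Str.replace expression " " "").toList
  pvLoopB [] s

-- ===== PRECONDITION & SPEC =====
def Spec_split_expression (expression : String) (out : List String) : Prop := out = split_expression_alt expression
instance (expression : String) (out : List String) : Decidable (Spec_split_expression expression out) := by unfold Spec_split_expression; infer_instance

-- ===== CLAIM (what is proved, stated in full; the proofs are below) =====
def Claim_equal_split_expression : Prop := ∀ (expression : String), Dom_split_expression expression → Spec_split_expression expression (split_expression expression)

-- ===== LEMMAS AND PROOFS =====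

-- Combined invariant: (L0) at depth 0 with empty sub, A's fold computes B's loop;
-- (L1) at depth p > 0 with accumulated sub, A's fold computes B's scan-then-loop.
theorem pv_main (n : Nat) :
    (∀ l : List Char, l.length ≤ n → ∀ res,
      (l.foldl pvStepA (res, [], 0)).1 = pvLoopB res l) ∧
    (∀ l : List Char, l.length ≤ n → ∀ res sub p, 0 < p →
      (l.foldl pvStepA (res, sub, p)).1 =
        (let r := pvScanB sub p l;
         if r.2.2 = 0 then pvLoopB (res ++ [String.mk r.1.dropLast]) r.2.1 else res)) := by
  induction n with
  | zero =>
    constructor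
    · intro l hl res
      have : l = [] := List.length_eq_zero_iff.mp (Nat.le_zero.mp hl)
      subst this; simp [pvLoopB]
    · intro l hl res sub p hp
      have : l = [] := List.length_eq_zero_iff.mp (Nat.le_zero.mp hl)
      subst this
      simp [pvScanB]
      intro h; omega
  | succ n ih =>
    constructor
    · intro l hl res
      match l with
      | [] => simp [pvLoopB]
      | c :: t =>
        have ht : t.length ≤ n := by simpa using Nat.succ_le_succ_iff.mp hl
        by_cases hc : c = '('
        · subst hc
          simp only [List.foldl_cons, pvStepA, pvLoopB]
          norm_num
          exact ih.2 t ht res [] 1 (by norm_num)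
        · simp only [List.foldl_cons, pvStepA, pvLoopB]
          rw [if_neg (by norm_num), if_neg hc, if_neg hc]
          exact ih.1 t ht _
    · intro l hl res sub p hp
      match l with
      | [] =>
        simp [pvScanB]
        intro h; omega
      | c :: t =>
        have ht : t.length ≤ n := by simpa using Nat.succ_le_succ_iff.mp hl
        simp only [List.foldl_cons, pvStepA, pvScanB]
        rw [if_pos hp, if_pos hp]
        by_cases hc : c = ')'
        · subst hc
          rw [if_pos rfl]
          by_cases hp1 : p = 1
          · subst hp1
            rw [if_pos rfl]
            have hscan : pvScanB (sub ++ [')']) 0 t = (sub ++ [')'], t, 0) := by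
              cases t <;> simp [pvScanB]
            rw [if_neg (by decide : ¬ (')' : Char) = '('), if_pos rfl,
              show (1 : Int) - 1 = 0 from rfl, hscan, if_pos rfl]
            rw [List.dropLast_concat]
            exact ih.1 t ht _
          · rw [if_neg hp1]
            rw [if_neg (by decide : ¬ (')' : Char) = '('), if_pos rfl]
            exact ih.2 t ht res (sub ++ [')']) (p - 1) (by omega)
        · rw [if_neg hc]
          by_cases hc2 : c = '('
          · subst hc2
            rw [if_pos rfl]
            rw [if_pos rfl]
            exact ih.2 t ht res (sub ++ ['(']) (p + 1) (by omega)
          · rw [if_neg hc2]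
            rw [if_neg hc2, if_neg hc]
            exact ih.2 t ht res (sub ++ [c]) p hp

-- ===== VERDICT (by name: the statement is the Claim_ definition above) =====
theorem split_expression_spec : Claim_equal_split_expression := by
  intro expression _
  unfold Spec_split_expression split_expression split_expression_alt
  exact (pv_main _).1 _ le_rfl []
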